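-- pv_equiv track=rewrite | github.com/Jakub345/driver-monitoring-system | modules/face_detection.py | _filter_eyes
-- ===== SOURCE A (Python) =====
-- def _filter_eyes(eyes, face_height):
--     """Filtruje wykryte oczy, wybierając najbardziej wiarygodne."""
--     if len(eyes) == 0:
--         return []
--
--     # Sortowanie według rozmiaru (większe są bardziej wiarygodne)
--     eyes = sorted(eyes, key=lambda e: e[2] * e[3], reverse=True)
--
--     # Wybieranie maksymalnie 2 największych oczu
--     eyes = eyes[:2] if len(eyes) > 2 else eyes
--
--     # Filtrowanie na podstawie położenia w górnej części twarzy
--     upper_eyes = [eye for eye in eyes if eye[1] < face_height/2]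
--
--     # Jeśli mamy przynajmniej jedno oko w górnej części, używamy tylko ich
--     if len(upper_eyes) >= 1:
--         return upper_eyes
--
--     # W przeciwnym razie używamy wszystkich oczu
--     return eyes
-- ===== SOURCE B (Python) =====
-- def _filter_eyes(eyes, face_height):
--     """One linear pass keeping the two largest eyes (stable on area ties) instead of a full sort."""
--     if len(eyes) == 0:
--         return []
--
--     # cand holds at most two eyes in descending area order; strict '>' keeps
--     # the earlier-indexed eye first on ties, matching a stable descending sort.
--     cand = []
--     for e in eyes:
--         a = e[2] * e[3]
--         if not cand:
--             cand = [e]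
--         elif a > cand[0][2] * cand[0][3]:
--             cand = [e, cand[0]]
--         elif len(cand) == 1:
--             cand = [cand[0], e]
--         elif a > cand[1][2] * cand[1][3]:
--             cand = [cand[0], e]
--
--     upper = [e for e in cand if e[1] < face_height / 2]
--     return upper if upper else cand
-- ===== Notes on version B (the rewrite author's own statement) =====
-- stated objective: faster
-- what changed: Replaces the full descending sort plus slice with a single linear pass that maintains the best and second-best eye by area (strict '>' so ties keep the earlier eye, matching the stable sort), then applies the unchanged upper-half filter.
import Mathlib
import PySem

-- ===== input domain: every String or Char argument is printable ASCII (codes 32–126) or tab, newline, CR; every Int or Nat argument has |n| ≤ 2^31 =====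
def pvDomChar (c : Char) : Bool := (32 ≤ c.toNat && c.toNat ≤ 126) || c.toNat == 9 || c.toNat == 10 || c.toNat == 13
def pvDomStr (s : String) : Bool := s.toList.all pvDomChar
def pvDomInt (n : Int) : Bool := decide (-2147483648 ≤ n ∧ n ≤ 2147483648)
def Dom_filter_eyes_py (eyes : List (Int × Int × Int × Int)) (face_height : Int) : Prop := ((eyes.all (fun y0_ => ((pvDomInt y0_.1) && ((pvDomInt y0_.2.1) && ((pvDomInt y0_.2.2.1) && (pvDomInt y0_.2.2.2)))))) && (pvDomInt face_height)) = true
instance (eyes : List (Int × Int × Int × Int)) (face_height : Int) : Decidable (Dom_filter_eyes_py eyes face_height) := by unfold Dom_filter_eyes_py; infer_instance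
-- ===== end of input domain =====

-- B replaces A's full descending sort + slice by one linear pass keeping the two
-- largest eyes (strict '>' so area ties keep the earlier eye); objective: faster.

-- ===== PORT A =====
-- Port of A, step for step. `eye[1] < face_height/2` compares an int with the float
-- face_height/2; on integers this is exactly `2*eye[1] < face_height` (exact port).
def filter_eyes_py (eyes : List (Int × Int × Int × Int)) (face_height : Int) : List (Int × Int × Int × Int) :=
  if eyes.length = 0 then []
  else
    let sortedEyes := PySem.List.sorted eyes (fun e => e.2.2.1 * e.2.2.2) true
    let eyes2 := if sortedEyes.length > 2 then PySem.List.slice sortedEyes none (some 2) else sortedEyes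
    let upper := eyes2.filter (fun e => 2 * e.2.1 < face_height)
    if upper.length ≥ 1 then upper else eyes2

-- ===== PORT B =====
-- B-side helper: the body of B's for-loop (cand holds ≤ 2 eyes, descending area).
def eyesStep (cand : List (Int × Int × Int × Int)) (e : Int × Int × Int × Int) : List (Int × Int × Int × Int) :=
  match cand with
  | [] => [e]
  | [c0] =>
      if c0.2.2.1 * c0.2.2.2 < e.2.2.1 * e.2.2.2 then [e, c0] else [c0, e]
  | c0 :: c1 :: _ =>
      if c0.2.2.1 * c0.2.2.2 < e.2.2.1 * e.2.2.2 then [e, c0]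
      else if c1.2.2.1 * c1.2.2.2 < e.2.2.1 * e.2.2.2 then [c0, e]
      else [c0, c1]

def filter_eyes_py_alt (eyes : List (Int × Int × Int × Int)) (face_height : Int) : List (Int × Int × Int × Int) :=
  if eyes.length = 0 then []
  else
    let cand := eyes.foldl eyesStep []
    let upper := cand.filter (fun e => 2 * e.2.1 < face_height)
    if upper.isEmpty then cand else upper

-- ===== PRECONDITION & SPEC =====
def Spec_filter_eyes_py (eyes : List (Int × Int × Int × Int)) (face_height : Int) (out : List (Int × Int × Int × Int)) : Prop := out = filter_eyes_py_alt eyes face_height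
instance (eyes : List (Int × Int × Int × Int)) (face_height : Int) (out : List (Int × Int × Int × Int)) : Decidable (Spec_filter_eyes_py eyes face_height out) := by unfold Spec_filter_eyes_py; infer_instance

-- ===== CLAIM (what is proved, stated in full; the proofs are below) =====
def Claim_equal_filter_eyes_py : Prop := ∀ (eyes : List (Int × Int × Int × Int)) (face_height : Int), Dom_filter_eyes_py eyes face_height → Spec_filter_eyes_py eyes face_height (filter_eyes_py eyes face_height)

-- ===== LEMMAS AND PROOFS =====

-- Inserting one element into a descending (stable) list and taking the first two
-- is exactly B's loop step applied to the first two elements.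
lemma take2_insertBy (x : Int × Int × Int × Int) (l : List (Int × Int × Int × Int)) :
    (PySem.List.insertBy (fun a b => decide ((fun e : Int × Int × Int × Int => e.2.2.1 * e.2.2.2) b < (fun e : Int × Int × Int × Int => e.2.2.1 * e.2.2.2) a)) x l).take 2
      = eyesStep (l.take 2) x := by
  match l with
  | [] => simp [PySem.List.insertBy, eyesStep]
  | [a] =>
      simp only [PySem.List.insertBy, eyesStep]
      split_ifs <;> simp_all
  | a :: b :: rest =>
      simp only [PySem.List.insertBy, eyesStep, List.take]
      split_ifs <;> simp_all

-- Folding B's step over the list computes the first two elements of the stable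
-- descending insertion sort.
lemma take2_foldl (xs : List (Int × Int × Int × Int)) (acc : List (Int × Int × Int × Int)) :
    (xs.foldl (fun acc x => PySem.List.insertBy (fun a b => decide ((fun e : Int × Int × Int × Int => e.2.2.1 * e.2.2.2) b < (fun e : Int × Int × Int × Int => e.2.2.1 * e.2.2.2) a)) x acc) acc).take 2
      = xs.foldl eyesStep (acc.take 2) := by
  induction xs generalizing acc with
  | nil => rfl
  | cons x xs ih => simp only [List.foldl_cons, ih, take2_insertBy]

lemma cand_eq_take2_sorted (xs : List (Int × Int × Int × Int)) :
    xs.foldl eyesStep []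
      = (PySem.List.sorted xs (fun e => e.2.2.1 * e.2.2.2) true).take 2 := by
  rw [PySem.List.sorted_rev_eq_foldl_insertBy, take2_foldl]
  rfl

-- `if len(u) >= 1 then u else c` is `u if u else c`.
lemma if_len_isEmpty (u c : List (Int × Int × Int × Int)) :
    (if u.length ≥ 1 then u else c) = (if u.isEmpty then c else u) := by
  cases u <;> simp

-- ===== VERDICT (by name: the statement is the Claim_ definition above) =====
theorem filter_eyes_py_spec : Claim_equal_filter_eyes_py := by
  intro eyes face_height _
  unfold Spec_filter_eyes_py filter_eyes_py filter_eyes_py_alt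
  by_cases h0 : eyes.length = 0
  · simp [h0]
  · simp only [h0, if_false]
    have hlen : (PySem.List.sorted eyes (fun e => e.2.2.1 * e.2.2.2) true).length = eyes.length :=
      PySem.List.length_sorted ..
    have hsel : (if (PySem.List.sorted eyes (fun e => e.2.2.1 * e.2.2.2) true).length > 2
          then PySem.List.slice (PySem.List.sorted eyes (fun e => e.2.2.1 * e.2.2.2) true) none (some 2)
          else PySem.List.sorted eyes (fun e => e.2.2.1 * e.2.2.2) true)
        = eyes.foldl eyesStep [] := by
      rw [cand_eq_take2_sorted]
      split_ifs with hgt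
      · have : PySem.List.slice (PySem.List.sorted eyes (fun e => e.2.2.1 * e.2.2.2) true) none (some ((2:Nat):Int))
            = (PySem.List.sorted eyes (fun e => e.2.2.1 * e.2.2.2) true).take 2 :=
          PySem.List.slice_to_natCast ..
        simpa using this
      · exact (List.take_of_length_le (by omega)).symm
    rw [hsel]
    exact if_len_isEmpty _ _
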